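/-
  TESTS OF THE WALKER (UserX/Walk.lean, Loop.lean, Call.lean, FrameTac.lean) on functions of the image `c/vorbis_f.elf`
  (bytes by `c/gen_code.py --only …`; the addresses are those of that file):

      (a) __asan_load8_noabort   79 bytes, 22 instructions: walked COMPLETELY on all eight paths — to the `ret`, or into
                                 `__asan_report`, where the invariant of the way `I v := v.rip ≠ REPORT` fails and the walk stops
      (b) memset                 61 bytes, 24 instructions: a loop (`u_loop` / `u_loop_back`) with a sanitizer check call inside
                                 (`CheckSpec` as a hypothesis), pushes and pops, walked to the `ret`: the function's contract
      (c) get8                   93 bytes, 25 instructions: struct field loads, a compare, a pointer increment, four check calls;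
                                 both paths to the `ret`, the contract proved
      (d) get32                  65 bytes, 24 instructions: a call to a function with a contract (`Calls` of UserX/Contract.lean)
      (e) an indirect call       `u_targets`
      (f) floor                  62 bytes, 15 instructions, 10 of them SSE (libm): the SSE rules of UserX/SseStep.lean are just
                                 more steps — the walker is unchanged; four paths to the `ret`
-/
import UserX.SseStep
import UserX.Loop
import UserX.Call
import UserX.FrameTac
namespace X86.User.WalkTest
open X86 X86.User

-- __asan_load8_noabort: 79 bytes, at 0x100800
#code_bytes code___asan_load8_noabort
  "4881ffefffff007733488d47074889f948c1e9034889c248c1ea034839d17409"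
  "80b90000c0000075130fb6920000c00084d2740783e00738c27e01c34883ec08"
  "ba00000000be08000000e80af8ffff"

-- memset: 61 bytes, at 0x101520
#code_bytes code_memset
  "41564155415455534989fc4189f64989d5bb00000000eb14498d2c1c4889efe8"
  "7ceeffff448875004883c3014c39eb72e74c89e05b5d415c415d415ec3"

-- get8: 93 bytes, at 0x104c60
#code_bytes code_get8
  "55534883ec084889fb488d7f30e88ebbffff488b6b30488d7b40e881bbffff48"
  "3b6b407222488dbb88000000e88fbaffffc7838800000001000000b800000000"
  "4883c4085b5dc3488d4501488943304889efe849b6ffff0fb64500ebe3"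

-- floor: 62 bytes, at 0x102380
#code_bytes code_floor
  "660f2f0570dd01007633f20f100d6edd0100660f2fc87625f2480f2cc0660fef"
  "c9f2480f2ac8660f2fc8760df20f5c0dacdc0100660f28c1c3660f28c1c3"

-- get32: 65 bytes, at 0x104d40
#code_bytes code_get32
  "415455534989fce814ffffff0fb6d84c89e7e809ffffff0fb6e8c1e50801dd4c"
  "89e7e8f9feffff0fb6d8c1e31001eb4c89e7e8e9feffffc1e01801d85b5d415c"
  "c3"

/-! The decode facts of every instruction of the four functions, made here (a proof package imports them from its decode
modules). A `theorem`'s proof is elaborated asynchronously and cannot add declarations: the facts must exist before. -/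
#code_sweep code___asan_load8_noabort
#code_sweep code_memset
#code_sweep code_get8
#code_sweep code_get32
#code_sweep code_floor

variable {L : Layout} {μ : Microarch} {u : State}

set_option linter.unusedSimpArgs false
set_option linter.unusedVariables false
set_option maxRecDepth 4000
set_option maxHeartbeats 4000000

/-- The invariant of the way of this proof: the machine is never at `__asan_report` (100059H). -/
abbrev NotReport : State → Prop := fun v => v.rip ≠ 0x100059

/-! ### (a) `__asan_load8_noabort`: every path, to the `ret` or into `__asan_report`

One `u_walk`: 8 paths, 60 steps. Four paths return (`w_rip : s.rip = ret`); four end at 100059H after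
`sub rsp, 8; mov edx, 0; mov esi, 8; call __asan_report`. THERE THE WALK STOPS BY ITSELF: the next step would need
`I s`, that is `s.rip ≠ 100059H` with `w_rip : s.rip = 1048665`. The goal it leaves (first failing path, `rdi > FFFFEFH`):

    hbr_100807 : 16777199 < UInt64.toNat a
    s_10084a : State
    w_rip : s_10084a.rip = 1048665
    w_rsi : s_10084a.reg Reg.rsi = Word.ofBV 8#32
    w_rdx : s_10084a.reg Reg.rdx = Word.ofBV 0#32
    w_rsp : s_10084a.reg Reg.rsp = sp - 16
    w_kept : RegsKept [Reg.rsi, Reg.rdx, Reg.rsp] u s_10084a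
    w_mem : s_10084a.mem = u.mem.writeLE (sp - 16) 8 1050703
    w_eq : Mem.EqOn 1050624 1050703 u.mem s_10084a.mem
    w_flags : s_10084a.flags = (u.flags.setStatus (Alu.sub a.toBitVec 16777199#64).flags).setStatus (Alu.sub sp.toBitVec 8#64).flags
    w_has_10084a : L.Has (sp - 16) 8
    ⊢ ReachVia L μ (fun v => ¬v.rip = 1048665) s_10084a P

A proof of the routine's contract (`CheckSpec`) shows each such path infeasible from `hbr_…` and the accessibility of the
range (here: `AccessibleSmall.ceiling` against `hbr_100807`). THIS test states what is true without that hypothesis: the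
routine returns, or the machine is at `__asan_report` — and every state stepped FROM on the way is not. -/
theorem load8_walk (a sp ret : Word) (hμ : μ.vendor = .intel)
    (hcode : HasCodeNat L u 0x100800 code___asan_load8_noabort.nat 79)
    (hrip : u.rip = 0x100800) (hrdi : u.reg .rdi = a) (hrsp : u.reg .rsp = sp)
    (hret : UInt64.ofNat (u.mem.readLE sp 8) = ret) (hretlt : ret < 0x40000000)
    (hstack : L.Has (sp - 16) 24) (hstackLo : 0x120000 ≤ (sp - 16).toNat)
    (hshadow : ∀ g : Word, L.Has (Word.ofBV (g.toBitVec >>> 3) + 12582912) 1) :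
    ReachVia L μ NotReport u (fun v =>
      (v.rip = ret ∧ v.reg .rsp = sp + 8 ∧ v.mem = u.mem ∧ RegsKept [.rsp, .rdx, .rcx, .rax] u v) ∨ v.rip = 0x100059) := by
  u_walk hcode [hμ] side (first | exact hshadow _ | u_omega)
  all_goals first
    | exact ReachVia.done (Or.inr w_rip)
    | exact ReachVia.done (Or.inl ⟨w_rip, w_rsp, w_mem, RegsKept.mono_all w_kept (by rfl)⟩)

/-! ### (b) `memset`: a loop with a check call inside -/

/-- **`memset(dst, c, n)`**, the contract a caller uses, from the contract of `__asan_store1_noabort` as a hypothesis. -/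
theorem memset_walk (dst c n sp ret : Word) (hμ : μ.vendor = .intel)
    (hcode : HasCodeNat L u 0x101520 code_memset.nat 61)
    (hrip : u.rip = 0x101520) (hrdi : u.reg .rdi = dst) (hrsi : u.reg .rsi = c) (hrdx : u.reg .rdx = n)
    (hrsp : u.reg .rsp = sp)
    (hret : UInt64.ofNat (u.mem.readLE sp 8) = ret) (hretlt : ret < 0x40000000)
    (hstack : L.Has (sp - 48) 56) (hstackLo : 0x120000 ≤ (sp - 48).toNat)
    (hdst : L.Has dst n.toNat) (hdstLo : 0x120000 ≤ dst.toNat)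
    (hdisj : dst.toNat + n.toNat ≤ (sp - 48).toNat ∨ (sp - 48).toNat + 56 ≤ dst.toNat)
    (hstore1 : CheckSpec L μ NotReport (fun m => Mem.EqOn 0x100000 0x120000 u.mem m) [.rax, .rcx, .rdx] 1
      (fun _ a => L.Has a 1) 0x1003c0) :
    ReachVia L μ NotReport u (fun v => v.rip = ret ∧ v.reg .rsp = sp + 8 ∧ v.reg .rax = dst ∧
      RegsKept callerSaved u v ∧
      Mem.SameExcept [⟨(sp - 48).toNat, sp.toNat⟩, ⟨dst.toNat, dst.toNat + n.toNat⟩] u.mem v.mem) := by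
  u_walk hcode [hμ] until [0x10154c] span [0x100000, 0x120000]
  -- the loop head: what varies is generalised, the exact memory is replaced by what stays true
  obtain ⟨i, hi, hile⟩ : ∃ i : Nat, s_101536.reg .rbx = UInt64.ofNat i ∧ i ≤ n.toNat := ⟨0, w_rbx, Nat.zero_le _⟩
  have hsame : Mem.SameExcept [⟨(sp - 48).toNat, sp.toNat⟩, ⟨dst.toNat, dst.toNat + n.toNat⟩] u.mem s_101536.mem := by
    u_same
  have hs1 : UInt64.ofNat (s_101536.mem.readLE (sp - 8) 8) = u.reg .r14 := by u_resolve
  have hs2 : UInt64.ofNat (s_101536.mem.readLE (sp - 16) 8) = u.reg .r13 := by u_resolve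
  have hs3 : UInt64.ofNat (s_101536.mem.readLE (sp - 24) 8) = u.reg .r12 := by u_resolve
  have hs4 : UInt64.ofNat (s_101536.mem.readLE (sp - 32) 8) = u.reg .rbp := by u_resolve
  have hs5 : UInt64.ofNat (s_101536.mem.readLE (sp - 40) 8) = u.reg .rbx := by u_resolve
  have hs0 : UInt64.ofNat (s_101536.mem.readLE sp 8) = ret := by u_resolve
  replace w_kept := w_kept.mono_all (S' := [.rbx, .r13, .r14, .r12, .rsp, .rbp, .rdi, .rax, .rcx, .rdx]) (by rfl)
  clear w_mem w_flags w_rbx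
  u_loop [i] (fun v => n.toNat - (v.reg .rbx).toNat)
  u_walk hcode [hμ] until [0x10154c] span [0x100000, 0x120000]
  · -- the check of the store: the byte is inside the destination
    u_omega
  · -- the back edge
    u_loop_back [i + 1]
    · rw [w_rbx, UInt64.ofNat_add]
      rfl
    · u_omega
    · rw [w_rbx]
      u_omega
  · -- the exit, walked to the `ret`
    exact ReachVia.done (Or.inl ⟨w_rip, w_rsp, w_rax, by u_saved, by u_same⟩)

/-! ### (c) `get8`: struct field loads, a compare, a pointer increment, four check calls -/

/-- **`get8(f)`** (stb_vorbis: one byte of the stream, or EOF), both paths to the `ret`: what it leaves of the registers and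
the memory. `p`, `pend`: the fields `stream` (at 30H) and `stream_end` (at 40H) of `*f`. -/
theorem get8_walk (f sp ret p pend : Word) (hμ : μ.vendor = .intel)
    (hcode : HasCodeNat L u 0x104c60 code_get8.nat 93)
    (hrip : u.rip = 0x104c60) (hrdi : u.reg .rdi = f) (hrsp : u.reg .rsp = sp)
    (hret : UInt64.ofNat (u.mem.readLE sp 8) = ret) (hretlt : ret < 0x40000000)
    (hstack : L.Has (sp - 32) 40) (hstackLo : 0x120000 ≤ (sp - 32).toNat)
    (hf : L.Has f 0x5e8) (hfLo : 0x120000 ≤ f.toNat)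
    (hfsp : f.toNat + 0x5e8 ≤ (sp - 32).toNat ∨ (sp - 32).toNat + 40 ≤ f.toNat)
    (hp : UInt64.ofNat (u.mem.readLE (f + 48) 8) = p) (hpend : UInt64.ofNat (u.mem.readLE (f + 64) 8) = pend)
    (hbuf : p.toNat < pend.toNat → L.Has p 1)
    (hload8 : CheckSpec L μ NotReport (fun m => Mem.EqOn 0x100000 0x120000 u.mem m) [.rax, .rcx, .rdx] 8
      (fun _ a => L.Has a 8) 0x100800)
    (hload1 : CheckSpec L μ NotReport (fun m => Mem.EqOn 0x100000 0x120000 u.mem m) [.rax, .rcx, .rdx] 1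
      (fun _ a => L.Has a 1) 0x100300)
    (hstore4 : CheckSpec L μ NotReport (fun m => Mem.EqOn 0x100000 0x120000 u.mem m) [.rax, .rcx, .rdx] 4
      (fun _ a => L.Has a 4) 0x100720) :
    ReachVia L μ NotReport u (fun v => v.rip = ret ∧ v.reg .rsp = sp + 8 ∧ RegsKept callerSaved u v ∧
      Mem.SameExcept [⟨(sp - 32).toNat, sp.toNat⟩, ⟨f.toNat + 48, f.toNat + 56⟩, ⟨f.toNat + 136, f.toNat + 140⟩]
        u.mem v.mem) := by
  u_walk hcode [hμ] span [0x100000, 0x120000]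
  -- the four check sites: the address is inside a live object
  case check_104c6d => u_omega
  case check_104c7a => u_omega
  case check_104cb2 =>
    apply hbuf
    rw [← hpend]
    u_omega
  case check_104c8c => u_omega
  -- the two paths, at the state after the `ret`
  all_goals exact ReachVia.done ⟨w_rip, w_rsp, by u_saved, by u_same⟩

/-! ### (d) `get32`: a call to a function with a contract -/

/-- **`get32(f)` up to the return of its first `get8(f)`**: the `call` is stepped, the callee's `AtEntry` is built from the
push (return address read back: `104D4CH`; alignment, stack room, the image's code and the program's invariant are the
goals `call_…`), its precondition is the goal `pre_104d47`, and the walk stops at the returned state with the callee's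
postcondition, footprint and the callee-saved registers as hypotheses. Here the contract `sp8` is a parameter: the goals
are taken as hypotheses, and what the returned state looks like is the statement. -/
theorem get32_first_call (K : Conv) (sp8 : Spec) (f sp ret : Word) (P : State → Prop) (hμ : μ.vendor = .intel)
    (hcode : HasCodeNat L u 0x104d40 code_get32.nat 65)
    (hrip : u.rip = 0x104d40) (hrdi : u.reg .rdi = f) (hrsp : u.reg .rsp = sp)
    (hstack : L.Has (sp - 32) 40) (hstackLo : 0x120000 ≤ (sp - 32).toNat)
    (halign : (sp - 32).toNat % 16 = 8) (hroom : K.stackLo + sp8.frame ≤ (sp - 32).toNat)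
    (htop : (sp - 32).toNat + 8 ≤ K.stackHi)
    (hcodeIn : ∀ m, Mem.EqOn 0x100000 0x120000 u.mem m → K.code.In m)
    (hinv : ∀ v, v.flags = u.flags → v.mxcsr = u.mxcsr → K.inv v)
    (hpre : ∀ v, v.reg .rdi = f → sp8.pre v)
    (hget8 : Calls L μ NotReport K 0x104c60 sp8)
    (hrest : ∀ v v', v'.rip = 0x104d4c → v'.reg .rsp = sp - 24 → v'.reg .r12 = f → sp8.post v v' →
      K.code.In v'.mem → ReachVia L μ NotReport v' P) :
    ReachVia L μ NotReport u P := by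
  u_walk hcode [hμ] span [0x100000, 0x120000]
  case call_code => exact hcodeIn _ w_eq
  case call_inv => exact hinv _ w_flags w_mxcsr
  case pre_104d47 =>
    apply hpre
    rw [w_kept.get .rdi rfl, hrdi]
  exact hrest _ _ w_rip w_rsp w_r12 w_post w_code

/-! ### (e) An indirect call: the target is one of the entries that have contracts -/

/-- The walk has stopped with RIP not a literal (`call rax`: `w_rip : v.rip = x`); `x` is one of two entries; `u_targets` splits,
and in each case the context says `hrip : v.rip = <literal>`: `u_walk` goes on from there (with the entry's contract). -/
example (v : State) (x : Word) (P : State → Prop) (w_rip : v.rip = x) (hx : x = 0x104c60 ∨ x = 0x104d40)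
    (h1 : v.rip = 0x104c60 → ReachVia L μ NotReport v P) (h2 : v.rip = 0x104d40 → ReachVia L μ NotReport v P) :
    ReachVia L μ NotReport v P := by
  u_targets [0x104c60, 0x104d40] w_rip
  · simp only [List.mem_cons, List.mem_nil_iff, or_false]
    exact hx
  · exact h1 hrip
  · exact h2 hrip

/-! ### (f) `floor`: SSE instructions are just more steps -/

/-- **`floor(x)`** (libm; `comisd`, `movsd`, `cvttsd2si`, `pxor`, `cvtsi2sd`, `subsd`, `movapd`, three `jbe`): all four paths to
the `ret`. Floating-point values are opaque (`x_…`, `cmp_…` variables); MXCSR keeps its masks (`hmx_…`); nothing is stored. -/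
theorem floor_walk (sp ret : Word) (hμ : UserX.MicroOK μ) (hs : SseOK u)
    (hcode : HasCodeNat L u 0x102380 code_floor.nat 62)
    (hrip : u.rip = 0x102380) (hrsp : u.reg .rsp = sp)
    (hret : UInt64.ofNat (u.mem.readLE sp 8) = ret) (hretlt : ret < 0x40000000)
    (hstack : L.Has sp 8) (hL : 0xC00000 ≤ L.hi) :
    ReachVia L μ NotReport u (fun v => v.rip = ret ∧ v.reg .rsp = sp + 8 ∧ v.mem = u.mem ∧
      RegsKept [.rsp, .rax] u v ∧ v.mxcsr &&& 0x1F80 = 0x1F80) := by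
  have hmask := hs.masks
  u_walk hcode [hμ.vendor]
  all_goals
    refine ReachVia.done ⟨w_rip, w_rsp, w_mem, RegsKept.mono_all w_kept (by rfl), ?_⟩
    rw [w_mxcsr]
    assumption

end X86.User.WalkTest
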